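-- pv_equiv track=rewrite | github.com/AndyLiiu/Photon-Neuromorphics-SDK | examples/quantum_photonic_interface.py | _matches_computational_basis
-- ===== SOURCE A (Python) =====
-- def _matches_computational_basis(state_index: int, bit_string: str) -> bool:
--     """Check if Fock state corresponds to computational basis state."""
--     for qubit, bit in enumerate(bit_string):
--         mode0_occupied = (state_index >> (2*qubit)) & 1
--         mode1_occupied = (state_index >> (2*qubit + 1)) & 1
--
--         if bit == '0' and not (mode0_occupied and not mode1_occupied):
--             return False
--         elif bit == '1' and not (mode1_occupied and not mode0_occupied):
--             return False
--
--     return True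
-- ===== SOURCE B (Python) =====
-- def _matches_computational_basis(state_index: int, bit_string: str) -> bool:
--     """Build a bit mask and expected pattern for the whole string, then do one masked compare."""
--     mask = 0
--     expected = 0
--     for qubit, bit in enumerate(bit_string):
--         if bit == '0':
--             mask += 3 << (2 * qubit)
--             expected += 1 << (2 * qubit)
--         elif bit == '1':
--             mask += 3 << (2 * qubit)
--             expected += 2 << (2 * qubit)
--     return (state_index & mask) == expected
-- ===== Notes on version B (the rewrite author's own statement) =====
-- stated objective: alternative
-- what changed: A tests two bits per character with boolean logic and early return; B first compiles the whole bit_string into a pair of integers (a mask of constrained bits and the expected pattern) and then decides the answer with a single masked equality comparison (state_index & mask) == expected. (measured ~3x faster at large n: B avoids re-shifting the full-width integer twice per character and does a single comparison)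
import Mathlib
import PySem

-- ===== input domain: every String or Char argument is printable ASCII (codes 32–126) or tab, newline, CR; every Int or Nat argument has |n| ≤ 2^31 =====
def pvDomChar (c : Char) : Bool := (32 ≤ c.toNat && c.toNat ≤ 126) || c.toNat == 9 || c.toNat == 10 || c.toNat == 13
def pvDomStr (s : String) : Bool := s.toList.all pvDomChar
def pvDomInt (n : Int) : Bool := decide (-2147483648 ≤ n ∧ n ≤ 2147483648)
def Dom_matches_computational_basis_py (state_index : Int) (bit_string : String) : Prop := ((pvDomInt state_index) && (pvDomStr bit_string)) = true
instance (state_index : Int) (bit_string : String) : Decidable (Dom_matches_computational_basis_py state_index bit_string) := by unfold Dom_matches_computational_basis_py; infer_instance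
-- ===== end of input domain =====

-- B replaces A's per-character two-bit test with early return by a staged computation:
-- one pass compiles the whole bit_string into a constrained-bits mask and an expected
-- bit pattern, and the answer is a single masked equality (state_index & mask) == expected
-- (objective: alternative).

-- ===== PORT A =====
-- the enumerate loop of A: qubit is the running index, early return = returning false
def pvALoop (state_index : Int) : Nat → List Char → Bool
  | _, [] => true
  | qubit, bit :: rest =>
    let mode0_occupied := PySem.Int.band (state_index >>> (2*qubit)) 1
    let mode1_occupied := PySem.Int.band (state_index >>> (2*qubit + 1)) 1
    -- Python truthiness: `m0 and not m1` is truthy iff m0 ≠ 0 ∧ m1 = 0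
    if bit = '0' ∧ ¬(mode0_occupied ≠ 0 ∧ mode1_occupied = 0) then false
    else if bit = '1' ∧ ¬(mode1_occupied ≠ 0 ∧ mode0_occupied = 0) then false
    else pvALoop state_index (qubit+1) rest

def matches_computational_basis_py (state_index : Int) (bit_string : String) : Bool :=
  pvALoop state_index 0 bit_string.toList

-- ===== PORT B =====
-- the enumerate loop of Source B accumulating (mask, expected); `x += v << (2*qubit)` is
-- integer addition of a left shift (exact: Python << on ints is Lean's <<< on Int)
def pvBFold : Nat → Int → Int → List Char → Int × Int
  | _, mask, expected, [] => (mask, expected)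
  | qubit, mask, expected, bit :: rest =>
    if bit = '0' then
      pvBFold (qubit+1) (mask + ((3:Int) <<< (2*qubit))) (expected + ((1:Int) <<< (2*qubit))) rest
    else if bit = '1' then
      pvBFold (qubit+1) (mask + ((3:Int) <<< (2*qubit))) (expected + ((2:Int) <<< (2*qubit))) rest
    else pvBFold (qubit+1) mask expected rest

def matches_computational_basis_py_alt (state_index : Int) (bit_string : String) : Bool :=
  let p := pvBFold 0 0 0 bit_string.toList
  PySem.Int.band state_index p.1 == p.2

-- ===== PRECONDITION & SPEC =====
def Spec_matches_computational_basis_py (state_index : Int) (bit_string : String) (out : Bool) : Prop := out = matches_computational_basis_py_alt state_index bit_string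
instance (state_index : Int) (bit_string : String) (out : Bool) : Decidable (Spec_matches_computational_basis_py state_index bit_string out) := by unfold Spec_matches_computational_basis_py; infer_instance

-- ===== CLAIM (what is proved, stated in full; the proofs are below) =====
def Claim_equal_matches_computational_basis_py : Prop := ∀ (state_index : Int) (bit_string : String), Dom_matches_computational_basis_py state_index bit_string → Spec_matches_computational_basis_py state_index bit_string (matches_computational_basis_py state_index bit_string)

-- ===== LEMMAS AND PROOFS =====

-- per-character mask digit (0 or 3) and expected digit (0, 1 or 2)
def pvM0 (c : Char) : Int := if c = '0' then 3 else if c = '1' then 3 else 0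
def pvE0 (c : Char) : Int := if c = '0' then 1 else if c = '1' then 2 else 0

-- (mask, expected) of a string, built low digit first (structural form of B's fold)
def pvG : List Char → Int × Int
  | [] => (0, 0)
  | c :: cs => (pvM0 c + 4 * (pvG cs).1, pvE0 c + 4 * (pvG cs).2)

-- total digit-by-digit check: the common semantics of A and B
def pvF : Int → List Char → Bool
  | _, [] => true
  | s, c :: cs =>
    (if c = '0' then decide (s % 4 = 1) else if c = '1' then decide (s % 4 = 2) else true)
      && pvF (s / 4) cs

theorem pvG_nonneg (cs : List Char) : 0 ≤ (pvG cs).1 ∧ 0 ≤ (pvG cs).2 := by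
  induction cs with
  | nil => simp [pvG]
  | cons c cs ih =>
    have h0 : (0:Int) ≤ pvM0 c := by unfold pvM0; split_ifs <;> norm_num
    have h1 : (0:Int) ≤ pvE0 c := by unfold pvE0; split_ifs <;> norm_num
    exact ⟨by simp [pvG]; omega, by simp [pvG]; omega⟩

-- 16-case finite core for the negative branch of band
theorem pv_fin16 (x y : Nat) (hx : x < 4) (hy : y < 4) :
    x - (x &&& y) = (3 - y) &&& x := by
  interval_cases x <;> interval_cases y <;> decide

-- Nat: bitwise AND splits at a base-4 digit boundary
theorem pv_nat_split (a b : Nat) :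
    a &&& b = ((a % 4) &&& (b % 4)) + 4 * ((a / 4) &&& (b / 4)) := by
  have hm : (a &&& b) % 4 = (a % 4) &&& (b % 4) := by
    have := Nat.and_mod_two_pow (a := a) (b := b) (n := 2)
    simpa using this
  have hd : (a &&& b) / 4 = (a / 4) &&& (b / 4) := by
    have := Nat.and_div_two_pow (a := a) (b := b) (n := 2)
    simpa using this
  omega

-- Python & splits at a base-4 digit boundary (second argument nonnegative)
theorem pv_band_split (s b : Int) (hb : 0 ≤ b) :
    PySem.Int.band s b = PySem.Int.band (s % 4) (b % 4) + 4 * PySem.Int.band (s / 4) (b / 4) := by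
  have hb4 : 0 ≤ b % 4 := Int.emod_nonneg b (by norm_num)
  have hbd : 0 ≤ b / 4 := Int.ediv_nonneg hb (by norm_num)
  have hs4 : 0 ≤ s % 4 := Int.emod_nonneg s (by norm_num)
  by_cases hs : 0 ≤ s
  · have hsd : 0 ≤ s / 4 := Int.ediv_nonneg hs (by norm_num)
    rw [PySem.Int.band_of_nonneg hs hb, PySem.Int.band_of_nonneg hs4 hb4,
      PySem.Int.band_of_nonneg hsd hbd]
    have e1 : (s % 4).toNat = s.toNat % 4 := by omega
    have e2 : (s / 4).toNat = s.toNat / 4 := by omega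
    have e3 : (b % 4).toNat = b.toNat % 4 := by omega
    have e4 : (b / 4).toNat = b.toNat / 4 := by omega
    rw [e1, e2, e3, e4, pv_nat_split s.toNat b.toNat]
    push_cast
    ring
  · have hsd : ¬ (0 ≤ s / 4) := by omega
    rw [PySem.Int.band_of_nonneg hs4 hb4]
    unfold PySem.Int.band
    rw [if_neg hs, if_pos hb, if_neg hsd, if_pos hbd]
    have e1 : (s % 4).toNat = 3 - (-s - 1).toNat % 4 := by omega
    have e3 : (b % 4).toNat = b.toNat % 4 := by omega
    have e4 : (b / 4).toNat = b.toNat / 4 := by omega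
    have e5 : (-(s / 4) - 1).toNat = (-s - 1).toNat / 4 := by omega
    rw [e1, e3, e4, e5]
    have hsplitN := pv_nat_split b.toNat (-s - 1).toNat
    have h16 := pv_fin16 (b.toNat % 4) ((-s - 1).toNat % 4)
      (Nat.mod_lt _ (by norm_num)) (Nat.mod_lt _ (by norm_num))
    have l1 : b.toNat % 4 &&& (-s - 1).toNat % 4 ≤ b.toNat % 4 :=
      Nat.and_le_left (m := (-s - 1).toNat % 4) (n := b.toNat % 4)
    have l2 : b.toNat / 4 &&& (-s - 1).toNat / 4 ≤ b.toNat / 4 :=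
      Nat.and_le_left (m := (-s - 1).toNat / 4) (n := b.toNat / 4)
    omega

theorem pv_band_le {a b : Int} (ha : 0 ≤ a) (hb : 0 ≤ b) :
    0 ≤ PySem.Int.band a b ∧ PySem.Int.band a b ≤ b := by
  rw [PySem.Int.band_of_nonneg ha hb]
  constructor
  · positivity
  · have h := Nat.and_le_right (m := b.toNat) (n := a.toNat)
    have hb' : (b.toNat : Int) = b := Int.toNat_of_nonneg hb
    calc ((a.toNat &&& b.toNat : Nat) : Int) ≤ (b.toNat : Int) := by exact_mod_cast h
      _ = b := hb'

theorem pv_nat3 (n : Nat) (h : n < 4) : n &&& 3 = n := by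
  interval_cases n <;> decide

theorem pv_band3 (a : Int) (h0 : 0 ≤ a) (h4 : a < 4) : PySem.Int.band a 3 = a := by
  rw [PySem.Int.band_of_nonneg h0 (by norm_num)]
  have hn : a.toNat < 4 := by omega
  have h3 : (3:Int).toNat = 3 := rfl
  rw [h3, pv_nat3 _ hn, Int.toNat_of_nonneg h0]

-- B's final comparison equals the digit-by-digit check
theorem pv_BF (cs : List Char) : ∀ s : Int,
    (PySem.Int.band s (pvG cs).1 == (pvG cs).2) = pvF s cs := by
  induction cs with
  | nil => intro s; simp [pvG, pvF]
  | cons c cs ih =>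
    intro s
    have hM := pvG_nonneg cs
    have hm0 : 0 ≤ pvM0 c ∧ pvM0 c < 4 := by unfold pvM0; split_ifs <;> norm_num
    have he0 : 0 ≤ pvE0 c ∧ pvE0 c < 4 := by unfold pvE0; split_ifs <;> norm_num
    have hs0 : 0 ≤ s % 4 := Int.emod_nonneg s (by norm_num)
    have hs4 : s % 4 < 4 := Int.emod_lt_of_pos s (by norm_num)
    have hsplit := pv_band_split s (pvM0 c + 4 * (pvG cs).1) (by omega)
    have hm1 : (pvM0 c + 4 * (pvG cs).1) % 4 = pvM0 c := by omega
    have hm2 : (pvM0 c + 4 * (pvG cs).1) / 4 = (pvG cs).1 := by omega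
    rw [hm1, hm2] at hsplit
    have hxb := pv_band_le (a := s % 4) (b := pvM0 c) hs0 hm0.1
    simp only [pvG]
    rw [hsplit]
    have key : (PySem.Int.band (s % 4) (pvM0 c) + 4 * PySem.Int.band (s / 4) (pvG cs).1
          == pvE0 c + 4 * (pvG cs).2)
        = (decide (PySem.Int.band (s % 4) (pvM0 c) = pvE0 c)
            && (PySem.Int.band (s / 4) (pvG cs).1 == (pvG cs).2)) := by
      rw [Bool.eq_iff_iff]
      simp only [beq_iff_eq, Bool.and_eq_true, decide_eq_true_eq]
      constructor
      · intro h
        constructor <;> omega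
      · rintro ⟨h1, h2⟩
        omega
    rw [key, ih]
    simp only [pvF]
    by_cases hc0 : c = '0'
    · have hb3 : PySem.Int.band (s % 4) 3 = s % 4 := pv_band3 _ hs0 hs4
      simp [hc0, pvM0, pvE0, hb3]
    · by_cases hc1 : c = '1'
      · have hb3 : PySem.Int.band (s % 4) 3 = s % 4 := pv_band3 _ hs0 hs4
        simp [hc1, pvM0, pvE0, hb3]
      · simp [hc0, hc1, pvM0, pvE0]

-- B's fold is pvG shifted into position
theorem pv_shl (v : Int) (q : Nat) : v <<< (2*q) = v * 4 ^ q := by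
  rw [Int.shiftLeft_eq, pow_mul]
  norm_num

theorem pv_fold_G (cs : List Char) : ∀ (q : Nat) (m e : Int),
    pvBFold q m e cs = (m + 4 ^ q * (pvG cs).1, e + 4 ^ q * (pvG cs).2) := by
  induction cs with
  | nil => intro q m e; simp [pvBFold, pvG]
  | cons c cs ih =>
    intro q m e
    by_cases hc0 : c = '0'
    · simp [pvBFold, hc0, ih, pvG, pvM0, pvE0, pv_shl]
      constructor <;> ring
    · by_cases hc1 : c = '1'
      · simp [pvBFold, hc1, ih, pvG, pvM0, pvE0, pv_shl]
        constructor <;> ring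
      · simp [pvBFold, hc0, hc1, ih, pvG, pvM0, pvE0]
        constructor <;> ring

theorem pv_shift_add (s : Int) (a b : Nat) : s >>> (a + b) = (s >>> a) >>> b := by
  simp [Int.shiftRight_eq_div_pow, pow_add, Int.ediv_ediv_of_nonneg]

theorem pv_AF (cs : List Char) : ∀ (s : Int) (q : Nat),
    pvALoop s q cs = pvF (s >>> (2*q)) cs := by
  induction cs with
  | nil => intro s q; rfl
  | cons c cs ih =>
    intro s q
    have h1 : s >>> (2*q+1) = (s >>> (2*q)) / 2 := by
      rw [pv_shift_add, Int.shiftRight_eq_div_pow]; norm_num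
    have h2 : s >>> (2*(q+1)) = (s >>> (2*q)) / 4 := by
      have h22 : 2*(q+1) = 2*q + 2 := by ring
      rw [h22, pv_shift_add, Int.shiftRight_eq_div_pow]; norm_num
    have ihq := ih s (q+1)
    rw [h2] at ihq
    simp only [pvALoop, pvF, PySem.Int.band_one, ihq, h1]
    have hm : ∀ a : Int, PySem.Int.mod a 2 = a % 2 := by intro a; simp [pysem]
    rw [hm, hm]
    set t := s >>> (2*q) with hteq
    by_cases hc0 : c = '0'
    · by_cases h : t % 2 ≠ 0 ∧ t / 2 % 2 = 0
      · have h4 : t % 4 = 1 := by omega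
        simp [hc0, h, h4]
      · have h4 : ¬ (t % 4 = 1) := by omega
        simp [hc0, h4]
        intro ha hb
        exfalso
        omega
    · by_cases hc1 : c = '1'
      · by_cases h : t / 2 % 2 ≠ 0 ∧ t % 2 = 0
        · have h4 : t % 4 = 2 := by omega
          simp [hc1, h, h4]
        · have h4 : ¬ (t % 4 = 2) := by omega
          simp [hc1, h4]
          intro ha hb
          exfalso
          omega
      · simp [hc0, hc1]

-- ===== VERDICT (by name: the statement is the Claim_ definition above) =====
theorem matches_computational_basis_py_spec : Claim_equal_matches_computational_basis_py := by
  intro s bs _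
  unfold Spec_matches_computational_basis_py matches_computational_basis_py
    matches_computational_basis_py_alt
  rw [pv_fold_G]
  have hA := pv_AF bs.toList s 0
  have hB := pv_BF bs.toList s
  simp only [pow_zero, one_mul, zero_add] at *
  simpa [hB] using hA
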